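-- pv_equiv track=rewrite | github.com/nazmulcuet11/acm | LeetCode/1023.py | process
-- ===== SOURCE A (Python) =====
-- def process(string):
--     t = []
--     u = None
--     d = {}
--     for ch in string:
--         if ch.islower():
--             oldCount = d.get(ch, 0)
--             d[ch] = oldCount + 1
--         else:
--             t.append((u, d))
--             d = {}
--             u = ch
--
--     t.append((u, d))
--
--     return t
-- ===== SOURCE B (Python) =====
-- def process(string):
--     # Scan backwards: each non-lowercase char closes the run of lowercase chars to its
--     # right; tally that run from the slice, build the result back-to-front, then reverse.
--     def tally(seg):
--         return {c: seg.count(c) for c in dict.fromkeys(seg)}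
--     out = []
--     j = len(string)
--     i = j
--     while i > 0:
--         i -= 1
--         if not string[i].islower():
--             out.append((string[i], tally(string[i + 1:j])))
--             j = i
--     out.append((None, tally(string[:j])))
--     out.reverse()
--     return out
-- ===== Notes on version B (the rewrite author's own statement) =====
-- stated objective: alternative
-- what changed: B replaces A's forward scan that threads a mutable counting dict through the whole string by a backward index loop: each non-lowercase char closes the lowercase run to its right, whose counts are tallied from a slice by a dict comprehension, and the result list is built back-to-front and reversed.
import Mathlib
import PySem

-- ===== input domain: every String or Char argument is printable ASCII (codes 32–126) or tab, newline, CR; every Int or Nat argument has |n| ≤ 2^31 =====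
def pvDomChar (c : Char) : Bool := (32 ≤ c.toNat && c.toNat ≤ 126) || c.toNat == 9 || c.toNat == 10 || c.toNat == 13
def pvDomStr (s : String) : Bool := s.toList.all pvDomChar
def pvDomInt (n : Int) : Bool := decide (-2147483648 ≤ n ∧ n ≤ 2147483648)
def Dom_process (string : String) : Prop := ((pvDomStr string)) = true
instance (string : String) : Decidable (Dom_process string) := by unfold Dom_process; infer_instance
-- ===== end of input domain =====

-- B scans the string BACKWARDS: each non-lowercase char closes the lowercase run to its
-- right, whose counts are tallied from a slice; the result is built back-to-front and
-- reversed (an alternative decomposition, not claimed faster). A = B proved on all inputs.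

-- a Python character as a length-1 string
def pvMk1 (c : Char) : String := String.mk [c]

-- ===== PORT A =====
-- state: (t, u, d) exactly as in A's loop
def processStep (st : List (Option String × List (String × Int)) × Option String × PySem.Dict String Int)
    (ch : Char) : List (Option String × List (String × Int)) × Option String × PySem.Dict String Int :=
  if PySem.Chars.islower ch then
    (st.1, st.2.1, st.2.2.insert (pvMk1 ch) (st.2.2.getD (pvMk1 ch) 0 + 1))
  else
    (st.1 ++ [(st.2.1, st.2.2.items)], some (pvMk1 ch), PySem.Dict.empty)

def process (string : String) : List (Option String × (List (String × Int))) :=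
  let s := string.toList.foldl processStep ([], none, PySem.Dict.empty)
  s.1 ++ [(s.2.1, s.2.2.items)]

-- ===== PORT B =====
-- tally(seg) = {c: seg.count(c) for c in dict.fromkeys(seg)}: the chars of the slice as
-- length-1 strings; dict.fromkeys = PySem.List.dedup; seg.count(c) for a single-char
-- needle is exactly the element count of that list
def tallyB (cs : List Char) : PySem.Dict String Int :=
  let ss := cs.map pvMk1
  (PySem.List.dedup ss).foldl (fun d c => d.insert c ((ss.count c : Int))) PySem.Dict.empty

-- the while loop: i counts down from len(string); j is the end of the current lowercase
-- run; string[i] is in range whenever read, so pyGetD's default is never used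
def bLoop (s : List Char) :
    Nat → Nat → List (Option String × List (String × Int)) →
      (List (Option String × List (String × Int)) × Nat)
  | 0, j, out => (out, j)
  | i + 1, j, out =>
      let ch := PySem.List.pyGetD s (i : Int) ' '
      if PySem.Chars.islower ch then
        bLoop s i j out
      else
        bLoop s i i
          (out ++ [(some (pvMk1 ch),
            (tallyB (PySem.List.slice s (some ((i : Int) + 1)) (some (j : Int)))).items)])

def process_alt (string : String) : List (Option String × (List (String × Int))) :=
  let s := string.toList
  let r := bLoop s s.length s.length []
  (r.1 ++ [(none, (tallyB (PySem.List.slice s none (some ((r.2 : Nat) : Int)))).items)]).reverse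

-- ===== PRECONDITION & SPEC =====
def Spec_process (string : String) (out : List (Option String × (List (String × Int)))) : Prop := out = process_alt string
instance (string : String) (out : List (Option String × (List (String × Int)))) : Decidable (Spec_process string out) := by unfold Spec_process; infer_instance

-- ===== CLAIM (what is proved, stated in full; the proofs are below) =====
def Claim_equal_process : Prop := ∀ (string : String), Dom_process string → Spec_process string (process string)

-- ===== LEMMAS AND PROOFS =====

-- proof-side canonical form: forward segmentation into (boundary, lowercase run) pairs
def segStep (st : List (Option String × List String) × Option String × List String)
    (ch : Char) : List (Option String × List String) × Option String × List String :=
  if PySem.Chars.islower ch then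
    (st.1, st.2.1, st.2.2 ++ [pvMk1 ch])
  else
    (st.1 ++ [(st.2.1, st.2.2)], some (pvMk1 ch), [])

def pvFin (seg : Option String × List String) : Option String × List (String × Int) :=
  (seg.1, (PySem.Dict.counter seg.2).items)

def pvSegsF (l : List Char) : List (Option String × List (String × Int)) :=
  let s := l.foldl segStep ([], none, [])
  (s.1 ++ [(s.2.1, s.2.2)]).map pvFin

-- inserting every key with a value that depends only on the key yields one entry per distinct key
theorem items_foldl_insert_keyed {α ν : Type} [BEq α] [LawfulBEq α] (f : α → ν) (l : List α) :
    (l.foldl (fun d c => d.insert c (f c)) PySem.Dict.empty).items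
      = (PySem.Set.ofList l).map (fun k => (k, f k)) := by
  induction l using List.reverseRecOn with
  | nil => rfl
  | append_singleton xs x ih =>
    rw [List.foldl_append, List.foldl_cons, List.foldl_nil, PySem.Dict.items_insert,
      PySem.Set.ofList_append_singleton, PySem.Set.add_eq_ite]
    by_cases hx : x ∈ PySem.Set.ofList xs
    · have hc : (xs.foldl (fun d c => d.insert c (f c)) PySem.Dict.empty).contains x = true := by
        rw [PySem.Dict.contains_iff_mem_keys]
        have : (xs.foldl (fun d c => d.insert c (f c)) PySem.Dict.empty).keys
            = PySem.Set.ofList xs := by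
          simp only [PySem.Dict.keys, ih, List.map_map]
          exact List.map_id _
        rw [this]; exact hx
      rw [hc, if_pos hx, ih, List.map_map]
      refine List.map_congr_left ?_
      intro k _
      by_cases hk : k = x
      · subst hk; simp
      · simp [hk]
    · have hc : (xs.foldl (fun d c => d.insert c (f c)) PySem.Dict.empty).contains x = false := by
        rw [Bool.eq_false_iff]
        intro h
        rw [PySem.Dict.contains_iff_mem_keys] at h
        have : (xs.foldl (fun d c => d.insert c (f c)) PySem.Dict.empty).keys
            = PySem.Set.ofList xs := by
          simp only [PySem.Dict.keys, ih, List.map_map]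
          exact List.map_id _
        rw [this] at h; exact hx h
      rw [hc, if_neg hx, ih]
      simp

-- the comprehension dict of a run is its Counter
theorem tallyB_eq_counter (cs : List Char) : tallyB cs = PySem.Dict.counter (cs.map pvMk1) := by
  apply PySem.Dict.ext
  rw [tallyB]
  rw [items_foldl_insert_keyed, PySem.Dict.items_counter,
    PySem.List.dedup_eq_ofList, PySem.Set.ofList_ofList]

-- loop invariant relating A's scan to the canonical forward segmentation
theorem process_loop (l : List Char) :
    ∀ (t : List (Option String × List (String × Int)))
      (segs : List (Option String × List String)) (u : Option String) (cs : List String),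
    l.foldl processStep (t ++ segs.map pvFin, u, PySem.Dict.counter cs)
      = (t ++ (l.foldl segStep (segs, u, cs)).1.map pvFin,
         (l.foldl segStep (segs, u, cs)).2.1,
         PySem.Dict.counter (l.foldl segStep (segs, u, cs)).2.2) := by
  induction l with
  | nil => intro t segs u cs; rfl
  | cons ch l ih =>
    intro t segs u cs
    by_cases h : PySem.Chars.islower ch = true
    · have hstep : processStep (t ++ segs.map pvFin, u, PySem.Dict.counter cs) ch
          = (t ++ segs.map pvFin, u, PySem.Dict.counter (cs ++ [pvMk1 ch])) := by
        simp only [processStep, h, if_pos]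
        rw [PySem.Dict.counter_append_singleton]
        rfl
      simp only [List.foldl_cons, hstep, segStep, h, if_pos]
      exact ih t segs u (cs ++ [pvMk1 ch])
    · have hstep : processStep (t ++ segs.map pvFin, u, PySem.Dict.counter cs) ch
          = (t ++ (segs ++ [(u, cs)]).map pvFin, some (pvMk1 ch),
             PySem.Dict.counter []) := by
        simp only [processStep, h, if_false, Bool.false_eq_true, List.map_append,
          List.map_cons, List.map_nil, List.append_assoc]
        rfl
      simp only [List.foldl_cons, hstep, segStep, h, if_false, Bool.false_eq_true]
      exact ih t (segs ++ [(u, cs)]) (some (pvMk1 ch)) []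

-- A computes the canonical segmentation
theorem process_eq_segsF (string : String) : process string = pvSegsF string.toList := by
  unfold process pvSegsF
  have h0 : (([], none, PySem.Dict.empty) :
      List (Option String × List (String × Int)) × Option String × PySem.Dict String Int)
      = (([] : List (Option String × List (String × Int))) ++
          ([] : List (Option String × List String)).map pvFin, none,
          PySem.Dict.counter ([] : List String)) := rfl
  rw [h0, process_loop]
  simp [pvFin]

-- folding segStep over an all-lowercase list only extends the current run
theorem segStep_all_lower (l : List Char)
    (hl : ∀ c ∈ l, PySem.Chars.islower c = true) :
    ∀ segs u cs, l.foldl segStep (segs, u, cs) = (segs, u, cs ++ l.map pvMk1) := by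
  induction l with
  | nil => intro segs u cs; simp
  | cons c l ih =>
    intro segs u cs
    have hc := hl c (List.mem_cons_self ..)
    simp only [List.foldl_cons, segStep, hc, if_pos]
    rw [ih (fun x hx => hl x (List.mem_cons_of_mem _ hx))]
    simp

-- appending a boundary char and an all-lowercase run appends one finalized segment
theorem segsF_append (t : List Char) (c : Char) (run : List Char)
    (hc : PySem.Chars.islower c = false)
    (hrun : ∀ x ∈ run, PySem.Chars.islower x = true) :
    pvSegsF (t ++ c :: run)
      = pvSegsF t ++ [(some (pvMk1 c), (PySem.Dict.counter (run.map pvMk1)).items)] := by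
  unfold pvSegsF
  rw [List.foldl_append, List.foldl_cons]
  have hstep : segStep (t.foldl segStep ([], none, [])) c
      = ((t.foldl segStep ([], none, [])).1
          ++ [((t.foldl segStep ([], none, [])).2.1, (t.foldl segStep ([], none, [])).2.2)],
         some (pvMk1 c), []) := by
    simp [segStep, hc]
  rw [hstep, segStep_all_lower run hrun]
  simp [pvFin]

-- the backward while loop, finalized and reversed, equals the canonical segmentation of
-- the prefix s[:j], provided s[i:j] is all lowercase
theorem bLoop_inv (s : List Char) :
    ∀ (i : Nat), ∀ (j : Nat) (out : List (Option String × List (String × Int))),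
      i ≤ j → (hj : j ≤ s.length) →
      (∀ k, i ≤ k → (hk : k < j) → PySem.Chars.islower (s[k]'(by omega)) = true) →
      ((bLoop s i j out).1
          ++ [(none, (tallyB (s.take (bLoop s i j out).2)).items)]).reverse
        = pvSegsF (s.take j) ++ out.reverse := by
  intro i
  induction i with
  | zero =>
    intro j out _ hj hlow
    have hall : ∀ c ∈ s.take j, PySem.Chars.islower c = true := by
      intro c hcmem
      obtain ⟨k, hk, rfl⟩ := List.getElem_of_mem hcmem
      have hkj : k < j := by
        have := hk; simp [List.length_take] at this; omega
      rw [List.getElem_take]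
      exact hlow k (Nat.zero_le _) hkj
    simp only [bLoop, List.reverse_append]
    rw [tallyB_eq_counter]
    unfold pvSegsF
    rw [segStep_all_lower (s.take j) hall]
    simp [pvFin]
  | succ i ih =>
    intro j out hij hj hlow
    have hi : i < s.length := by omega
    have hch : PySem.List.pyGetD s (i : Int) ' ' = s[i]'hi := by
      rw [PySem.List.pyGetD_natCast, List.getD_eq_getElem s ' ' hi]
    by_cases h : PySem.Chars.islower (s[i]'hi) = true
    · have hred : bLoop s (i + 1) j out = bLoop s i j out := by
        simp only [bLoop, hch, h, if_pos]
      rw [hred]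
      exact ih j out (by omega) hj (fun k hk1 hk2 => by
        rcases Nat.eq_or_lt_of_le hk1 with rfl | hk3
        · exact h
        · exact hlow k (by omega) hk2)
    · have hrun : ∀ x ∈ (s.drop (i + 1)).take (j - (i + 1)),
          PySem.Chars.islower x = true := by
        intro x hx
        obtain ⟨k, hk, rfl⟩ := List.getElem_of_mem hx
        have hkb : k < j - (i + 1) := by
          have := hk; simp [List.length_take, List.length_drop] at this; omega
        rw [List.getElem_take, List.getElem_drop]
        exact hlow (i + 1 + k) (by omega) (by omega)
      have hsplit : s.take j = s.take i ++ s[i]'hi :: (s.drop (i + 1)).take (j - (i + 1)) := by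
        have h1 : j = i + (j - i) := by omega
        conv_lhs => rw [h1, List.take_add]
        rw [List.drop_eq_getElem_cons hi]
        have h2 : j - i = (j - (i + 1)) + 1 := by omega
        rw [h2, List.take_succ_cons]
      have hslice : PySem.List.slice s (some ((i : Int) + 1)) (some ((j : Nat) : Int))
          = (s.drop (i + 1)).take (j - (i + 1)) := by
        have : ((i : Int) + 1) = (((i + 1 : Nat) : Int)) := by push_cast; ring
        rw [this, PySem.List.slice_natCast]
      have hred : bLoop s (i + 1) j out
          = bLoop s i i (out ++ [(some (pvMk1 (s[i]'hi)),
              (tallyB ((s.drop (i + 1)).take (j - (i + 1)))).items)]) := by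
        simp only [bLoop, hch, h, if_false, Bool.false_eq_true, hslice]
      rw [hred,
        ih i _ (le_refl i) (by omega) (fun k hk1 hk2 => by omega),
        hsplit,
        segsF_append (s.take i) (s[i]'hi) _ (by simpa using h) hrun,
        tallyB_eq_counter]
      simp

-- ===== VERDICT (by name: the statement is the Claim_ definition above) =====
theorem process_spec : Claim_equal_process := by
  intro string _
  show process string = process_alt string
  rw [process_eq_segsF]
  show pvSegsF string.toList =
    ((bLoop string.toList string.toList.length string.toList.length []).1 ++
      [(none, (tallyB (PySem.List.slice string.toList none
        (some (((bLoop string.toList string.toList.length string.toList.length []).2 : Nat) : Int)))).items)]).reverse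
  rw [PySem.List.slice_to_natCast]
  have := bLoop_inv string.toList string.toList.length string.toList.length []
    (le_refl _) (le_refl _) (fun k hk1 hk2 => by omega)
  rw [List.take_length] at this
  simpa using this.symm
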